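-- pv_equiv track=rewrite | github.com/psyfull1/- | module2hard.py | storage
-- ===== SOURCE A (Python) =====
-- def storage(n):
--     pairs = []
--     for i in range(1, n):
--         for j in range(i + 1, n + 1):
--             if (i + j) % n == 0:
--                 pairs.append(str(i) + str(j))
--
--     result = ''.join(pairs)
--     return result
-- ===== SOURCE B (Python) =====
-- def storage(n):
--     # Only the pair (i, n-i) with 1 <= i < n/2 can have a sum divisible by n,
--     # so emit those directly in one O(n) pass.
--     return ''.join(str(i) + str(n - i) for i in range(1, (n - 1) // 2 + 1))
-- ===== Notes on version B (the rewrite author's own statement) =====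
-- stated objective: faster
-- what changed: Replaced the quadratic double loop that tests every pair for a sum divisible by n with a single linear pass over the lower half of the range, emitting str(i)+str(n-i) directly, since j = n-i is the only partner whose sum with i is divisible by n.
import Mathlib
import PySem

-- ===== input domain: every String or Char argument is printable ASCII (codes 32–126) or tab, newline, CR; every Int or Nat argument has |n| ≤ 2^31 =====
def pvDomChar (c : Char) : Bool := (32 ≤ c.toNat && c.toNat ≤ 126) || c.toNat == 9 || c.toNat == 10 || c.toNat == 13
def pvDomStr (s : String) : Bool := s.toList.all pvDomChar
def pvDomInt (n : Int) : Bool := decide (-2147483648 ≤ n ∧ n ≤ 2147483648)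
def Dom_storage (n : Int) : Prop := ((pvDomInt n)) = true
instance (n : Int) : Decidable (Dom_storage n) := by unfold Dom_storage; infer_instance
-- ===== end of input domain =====

-- B replaces A's quadratic double loop by a single pass over the lower half of the
-- range, since j = n-i is the only partner whose sum with i is divisible by n (objective: faster).

-- ===== PORT A =====
def storage (n : Int) : String :=
  let pairs : List String :=
    (PySem.List.pyRange 1 n 1).foldl (fun pairs i =>
      (PySem.List.pyRange (i + 1) (n + 1) 1).foldl (fun pairs j =>
        if PySem.Int.mod (i + j) n == 0 then
          pairs ++ [PySem.Int.toStr i ++ PySem.Int.toStr j]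
        else pairs) pairs) []
  PySem.Str.join "" pairs

-- ===== PORT B =====
def storage_alt (n : Int) : String :=
  PySem.Str.join ""
    ((PySem.List.pyRange 1 (PySem.Int.floordiv (n - 1) 2 + 1) 1).map
      (fun i => PySem.Int.toStr i ++ PySem.Int.toStr (n - i)))

-- ===== PRECONDITION & SPEC =====
def Spec_storage (n : Int) (out : String) : Prop := out = storage_alt n
instance (n : Int) (out : String) : Decidable (Spec_storage n out) := by unfold Spec_storage; infer_instance

-- ===== CLAIM (what is proved, stated in full; the proofs are below) =====
def Claim_equal_storage : Prop := ∀ (n : Int), Dom_storage n → Spec_storage n (storage n)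

-- ===== LEMMAS AND PROOFS =====

-- the contribution of one outer-loop iteration i of A
def pvG (n i : Int) : List String :=
  ((PySem.List.pyRange (i + 1) (n + 1) 1).filter
      (fun j => PySem.Int.mod (i + j) n == 0)).map
    (fun j => PySem.Int.toStr i ++ PySem.Int.toStr j)

theorem pv_outer_fold (n : Int) (l : List Int) (acc : List String) :
    l.foldl (fun pairs i =>
      (PySem.List.pyRange (i + 1) (n + 1) 1).foldl (fun pairs j =>
        if PySem.Int.mod (i + j) n == 0 then
          pairs ++ [PySem.Int.toStr i ++ PySem.Int.toStr j]
        else pairs) pairs) acc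
    = acc ++ l.flatMap (pvG n) := by
  induction l generalizing acc with
  | nil => simp
  | cons i t ih =>
    simp only [List.foldl_cons, List.flatMap_cons]
    rw [PySem.List.foldl_append_if, ih, List.append_assoc]
    rfl

-- a filter whose predicate holds exactly at c, on a duplicate-free list
theorem pv_filter_single {p : Int → Bool} (c : Int) :
    ∀ (l : List Int), l.Nodup → (∀ x ∈ l, (p x = true ↔ x = c)) →
      l.filter p = if c ∈ l then [c] else [] := by
  intro l
  induction l with
  | nil => intro _ _; simp
  | cons x t ih =>
    intro hnd h
    have hx := h x (List.mem_cons_self)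
    have ht := ih (List.Nodup.of_cons hnd) (fun y hy => h y (List.mem_cons_of_mem _ hy))
    by_cases hxc : x = c
    · subst hxc
      have hpx : p x = true := hx.mpr rfl
      have hxt : x ∉ t := (List.nodup_cons.mp hnd).1
      rw [List.filter_cons_of_pos hpx, ht, if_neg hxt]
      simp
    · have hpx : p x ≠ true := fun hp => hxc (hx.mp hp)
      rw [List.filter_cons_of_neg (by simpa using hpx), ht]
      by_cases hct : c ∈ t
      · rw [if_pos hct, if_pos (List.mem_cons_of_mem _ hct)]
      · rw [if_neg hct, if_neg (by simp [List.mem_cons, hct]; exact fun hc => hxc hc.symm)]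

theorem pv_cond_iff (n i x : Int) (h1 : 1 ≤ i) (hin : i < n)
    (hx : i + 1 ≤ x ∧ x < n + 1) :
    ((PySem.Int.mod (i + x) n == 0) = true ↔ x = n - i) := by
  rw [beq_iff_eq, PySem.Int.mod_eq_zero_iff_dvd]
  constructor
  · rintro ⟨k, hk⟩
    have hn : 0 < n := by omega
    have hk0 : 0 < k := by nlinarith
    have hk2 : k < 2 := by nlinarith
    have hk1 : k = 1 := by omega
    rw [hk1, mul_one] at hk
    omega
  · intro hx'; exact ⟨1, by omega⟩

theorem pv_pvG_of_lt (n i : Int) (h1 : 1 ≤ i) (h2 : 2 * i < n) :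
    pvG n i = [PySem.Int.toStr i ++ PySem.Int.toStr (n - i)] := by
  unfold pvG
  rw [pv_filter_single (n - i) _ (PySem.List.nodup_pyRange_one _ _)
      (fun x hxm => pv_cond_iff n i x h1 (by omega)
        ((PySem.List.mem_pyRange_one).mp hxm))]
  rw [if_pos ((PySem.List.mem_pyRange_one).mpr (by omega))]
  simp

theorem pv_pvG_of_ge (n i : Int) (h1 : 1 ≤ i) (hin : i < n) (h2 : n ≤ 2 * i) :
    pvG n i = [] := by
  unfold pvG
  rw [pv_filter_single (n - i) _ (PySem.List.nodup_pyRange_one _ _)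
      (fun x hxm => pv_cond_iff n i x h1 hin
        ((PySem.List.mem_pyRange_one).mp hxm))]
  rw [if_neg (fun hm => by have := (PySem.List.mem_pyRange_one).mp hm; omega)]
  simp

theorem pv_flatMap_singleton {α β : Type} (g : α → List β) (f : α → β) :
    ∀ (l : List α), (∀ x ∈ l, g x = [f x]) → l.flatMap g = l.map f := by
  intro l
  induction l with
  | nil => simp
  | cons x t ih =>
    intro h
    simp only [List.flatMap_cons, List.map_cons, h x (List.mem_cons_self),
      ih (fun y hy => h y (List.mem_cons_of_mem _ hy))]
    rfl

theorem storage_spec_aux (n : Int) : storage n = storage_alt n := by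
  have hd := PySem.Int.floordiv_mul_add_mod (n - 1) 2
  have hr0 : 0 ≤ PySem.Int.mod (n - 1) 2 := PySem.Int.mod_nonneg (n - 1) (by norm_num)
  have hr1 : PySem.Int.mod (n - 1) 2 < 2 := PySem.Int.mod_lt (n - 1) (by norm_num)
  by_cases hn : n ≤ 1
  · have h1 : PySem.List.pyRange 1 n 1 = [] := PySem.List.pyRange_one_eq_nil (by omega)
    have h2 : PySem.List.pyRange 1 (PySem.Int.floordiv (n - 1) 2 + 1) 1 = [] :=
      PySem.List.pyRange_one_eq_nil (by omega)
    simp only [storage, storage_alt, h1, h2, List.foldl_nil, List.map_nil]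
  · push Not at hn
    have hm1 : (1 : Int) ≤ PySem.Int.floordiv (n - 1) 2 + 1 := by omega
    have hm2 : PySem.Int.floordiv (n - 1) 2 + 1 ≤ n := by omega
    unfold storage storage_alt
    rw [pv_outer_fold, List.nil_append,
      PySem.List.pyRange_one_append 1 (PySem.Int.floordiv (n - 1) 2 + 1) n hm1 hm2, List.flatMap_append]
    have hp1 : (PySem.List.pyRange 1 (PySem.Int.floordiv (n - 1) 2 + 1) 1).flatMap (pvG n)
        = (PySem.List.pyRange 1 (PySem.Int.floordiv (n - 1) 2 + 1) 1).map
            (fun i => PySem.Int.toStr i ++ PySem.Int.toStr (n - i)) := by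
      refine pv_flatMap_singleton _ _ _ (fun x hx => ?_)
      have hb := (PySem.List.mem_pyRange_one).mp hx
      exact pv_pvG_of_lt n x (by omega) (by omega)
    have hp2 : (PySem.List.pyRange (PySem.Int.floordiv (n - 1) 2 + 1) n 1).flatMap (pvG n) = [] := by
      rw [List.flatMap_eq_nil_iff]
      intro x hx
      have hb := (PySem.List.mem_pyRange_one).mp hx
      exact pv_pvG_of_ge n x (by omega) (by omega) (by omega)
    rw [hp1, hp2, List.append_nil]

-- ===== VERDICT (by name: the statement is the Claim_ definition above) =====
theorem storage_spec : Claim_equal_storage := by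
  intro n _
  exact storage_spec_aux n
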